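-- pv_equiv track=rewrite | github.com/comp110-24f/comp-110-workspace-cauamelobr | exercises/ex06/dictionary.py | count
-- ===== SOURCE A (Python) =====
-- def count(values: list[str]) -> dict[str, int]:
--     # Empty dict to store counts
--     count_dict: dict[str, int] = {}
--
--     # loop though the list "values"
--     for item in values:
--         # check if the item is already a key in the dictionary
--         if item in count_dict:
--             count_dict[item] += 1  # adds 1 for the value of the dict
--         else:
--             # otherwise, add the item in the dict with the frequency of 1
--             count_dict[item] = 1
--
--     return count_dict
-- ===== SOURCE B (Python) =====
-- def count(values: list[str]) -> dict[str, int]: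
--     # Distinct keys in first-occurrence order, each counted by a full scan.
--     return {v: values.count(v) for v in dict.fromkeys(values)}
-- ===== Notes on version B (the rewrite author's own statement) =====
-- stated objective: simpler
-- what changed: Replaces the incremental dict-update loop by a two-phase comprehension: dedupe the keys once with dict.fromkeys, then count each distinct key with list.count.
import Mathlib
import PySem

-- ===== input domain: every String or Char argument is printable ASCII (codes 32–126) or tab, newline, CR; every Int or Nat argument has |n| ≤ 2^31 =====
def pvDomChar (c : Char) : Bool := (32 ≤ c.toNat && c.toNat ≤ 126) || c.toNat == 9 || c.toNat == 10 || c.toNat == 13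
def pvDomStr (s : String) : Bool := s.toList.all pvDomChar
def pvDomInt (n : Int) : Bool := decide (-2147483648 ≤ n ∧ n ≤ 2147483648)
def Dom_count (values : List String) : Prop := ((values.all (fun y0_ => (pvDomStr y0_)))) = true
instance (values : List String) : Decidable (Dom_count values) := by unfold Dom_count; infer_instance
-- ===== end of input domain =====

-- B replaces A's incremental dict-update loop by dedup-then-count-per-key; objective: simpler.

-- ===== PORT A =====
def count (values : List String) : List (String × Int) :=
  (values.foldl
    (fun d item =>
      if d.contains item then d.modify item 0 (· + 1)  -- count_dict[item] += 1
      else d.insert item 1)                            -- count_dict[item] = 1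
    PySem.Dict.empty).items

-- ===== PORT B =====
def count_alt (values : List String) : List (String × Int) :=
  (PySem.List.dedup values).map (fun v => (v, (values.count v : Int)))

-- ===== PRECONDITION & SPEC =====
def Spec_count (values : List String) (out : List (String × Int)) : Prop := out = count_alt values
instance (values : List String) (out : List (String × Int)) : Decidable (Spec_count values out) := by unfold Spec_count; infer_instance

-- ===== CLAIM (what is proved, stated in full; the proofs are below) =====
def Claim_equal_count : Prop := ∀ (values : List String), Dom_count values → Spec_count values (count values)

-- ===== LEMMAS AND PROOFS =====

-- A's two-branch loop body is extensionally the Counter step.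
theorem count_step_eq (d : PySem.Dict String Int) (x : String) :
    (if d.contains x then d.modify x 0 (· + 1) else d.insert x 1) = d.modify x 0 (· + 1) := by
  by_cases h : d.contains x = true
  · simp [h]
  · simp at h
    simp [h]
    simp [PySem.Dict.contains, List.any_eq_false] at h
    have hg : d.get? x = none := by
      simp [PySem.Dict.get?, List.find?_eq_none]
      exact h
    simp [PySem.Dict.modify, PySem.Dict.getD, hg]

-- ===== VERDICT (by name: the statement is the Claim_ definition above) =====
theorem count_spec : Claim_equal_count := by
  intro values _
  show count values = count_alt values
  unfold count count_alt
  have hf : (fun (d : PySem.Dict String Int) item =>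
      if d.contains item then d.modify item 0 (· + 1) else d.insert item 1)
      = (fun d x => d.modify x 0 (· + 1)) := by
    funext d x; exact count_step_eq d x
  rw [hf, ← PySem.Dict.counter_eq_foldl, PySem.Dict.items_counter]
  simp
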